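-- pv_equiv track=rewrite | github.com/Takeshilazo/ejercicios-de-python1 | eliminarvocales.py | reemplazarvocal
-- ===== SOURCE A (Python) =====
-- def reemplazarvocal(texto):
--     if len(texto) == 0:
--         return texto
--
--     resultado = texto[0]
--
--     for i in range(1, len(texto)):
--         letra_actual = texto[i]
--
--         match letra_actual.lower():
--             case 'a' | 'e' | 'i' | 'o' | 'u':
--                 # Es vocal → reemplazar por la letra anterior
--                 resultado += texto[i-1]
--             case _:
--                 # Es consonante → mantener igual
--                 resultado += letra_actual
--
--     return resultado
-- ===== SOURCE B (Python) =====
-- VOCALES = 'aeiouAEIOU'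
--
-- def reemplazarvocal(texto):
--     # Block algorithm: each maximal run of vowels texto[i:j] (i > 0) becomes the
--     # slice texto[i-1:j-1] of the ORIGINAL text (the run shifted one left);
--     # everything else is copied through unchanged.
--     n = len(texto)
--     partes = []
--     i = 0
--     while i < n:
--         if i > 0 and texto[i] in VOCALES:
--             j = i + 1
--             while j < n and texto[j] in VOCALES:
--                 j += 1
--             partes.append(texto[i-1:j-1])
--             i = j
--         else:
--             partes.append(texto[i])
--             i += 1
--     return ''.join(partes)
-- ===== Notes on version B (the rewrite author's own statement) =====
-- stated objective: alternative
-- what changed: Replaces A's per-character index loop (lowercase-and-match each char, building the result by string concatenation) with a block algorithm: scan for maximal vowel runs and replace each whole run texto[i:j] by the original slice texto[i-1:j-1] at once, collecting pieces in a list joined once.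
import Mathlib
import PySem

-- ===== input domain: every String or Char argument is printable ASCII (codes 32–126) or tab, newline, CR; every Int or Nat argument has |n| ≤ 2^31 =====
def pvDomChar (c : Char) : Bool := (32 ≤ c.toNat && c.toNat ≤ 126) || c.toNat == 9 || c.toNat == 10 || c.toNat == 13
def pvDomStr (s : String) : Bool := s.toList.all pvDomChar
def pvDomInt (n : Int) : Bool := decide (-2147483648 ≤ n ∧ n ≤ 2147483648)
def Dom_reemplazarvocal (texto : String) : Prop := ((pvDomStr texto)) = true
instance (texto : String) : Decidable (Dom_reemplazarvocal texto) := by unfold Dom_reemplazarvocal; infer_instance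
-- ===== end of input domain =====

-- B replaces A's per-character loop with a slice-based block algorithm: each maximal
-- vowel run texto[i:j] (i > 0) is replaced at once by the original slice texto[i-1:j-1],
-- collected into a list joined once (alternative decomposition, avoids per-char decisions).

-- ===== PORT A =====
-- letra_actual.lower() matched against 'a'|'e'|'i'|'o'|'u'
def pvVowelA (c : Char) : Bool :=
  let l := PySem.Chars.lowerChar c
  l == 'a' || l == 'e' || l == 'i' || l == 'o' || l == 'u'

def reemplazarvocal (texto : String) : String :=
  if PySem.Str.len texto == 0 then texto
  else
    let cs := texto.toList
    -- resultado = texto[0]; indices below are always in range, so the default ' ' is never used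
    let resultado : List Char := [PySem.List.pyGetD cs 0 ' ']
    String.ofList ((PySem.List.pyRange 1 (PySem.Str.len texto) 1).foldl
      (fun res i =>
        if pvVowelA (PySem.List.pyGetD cs i ' ') then res ++ [PySem.List.pyGetD cs (i - 1) ' ']
        else res ++ [PySem.List.pyGetD cs i ' ']) resultado)

-- ===== PORT B =====
-- texto[c] in VOCALES
def pvVowelB (c : Char) : Bool := ("aeiouAEIOU".toList).contains c

-- inner while: j advances while j < n and texto[j] is a vowel (short-circuit 'and')
def pvFindRun (cs : List Char) (j : Nat) : Nat :=
  if h : j < cs.length then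
    if pvVowelB (cs[j]'h) then pvFindRun cs (j + 1) else j
  else j
termination_by cs.length - j
decreasing_by omega

-- cited by pvLoopB's termination proof
theorem pvFindRun_ge (cs : List Char) (j : Nat) : j ≤ pvFindRun cs j := by
  induction hcl : cs.length - j generalizing j with
  | zero =>
    rw [pvFindRun]
    split
    · rename_i h; exact absurd h (by omega)
    · omega
  | succ q ih =>
    rw [pvFindRun]
    split
    · split
      · have := ih (j + 1) (by omega); omega
      · omega
    · omega

-- outer while over i, accumulating the list 'partes' of pieces (indices guarded by i < n,
-- so plain getElem is exact; the slice texto[i-1:j-1] is PySem.List.slice)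
def pvLoopB (cs : List Char) (i : Nat) (partes : List (List Char)) : List (List Char) :=
  if h : i < cs.length then
    if 0 < i ∧ pvVowelB (cs[i]'h) then
      let j := pvFindRun cs (i + 1)
      pvLoopB cs j (partes ++ [PySem.List.slice cs (some ((i : ℤ) - 1)) (some ((j : ℤ) - 1))])
    else
      pvLoopB cs (i + 1) (partes ++ [[cs[i]'h]])
  else partes
termination_by cs.length - i
decreasing_by
  · have := pvFindRun_ge cs (i + 1); omega
  · omega

def reemplazarvocal_alt (texto : String) : String :=
  String.ofList (List.flatten (pvLoopB texto.toList 0 []))  -- ''.join(partes)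

-- ===== PRECONDITION & SPEC =====
def Spec_reemplazarvocal (texto : String) (out : String) : Prop := out = reemplazarvocal_alt texto
instance (texto : String) (out : String) : Decidable (Spec_reemplazarvocal texto out) := by unfold Spec_reemplazarvocal; infer_instance

-- ===== CLAIM (what is proved, stated in full; the proofs are below) =====
def Claim_equal_reemplazarvocal : Prop := ∀ (texto : String), Dom_reemplazarvocal texto → Spec_reemplazarvocal texto (reemplazarvocal texto)

-- ===== LEMMAS AND PROOFS =====

-- the two vowel tests agree on every character of the domain (codes ≤ 126)
theorem pvVowel_eq_aux : ∀ n < 127, pvVowelA (Char.ofNat n) = pvVowelB (Char.ofNat n) := by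
  decide

theorem pvVowel_eq (c : Char) (h : pvDomChar c = true) : pvVowelA c = pvVowelB c := by
  have hn : c.toNat < 127 := by simp [pvDomChar] at h; omega
  have := pvVowel_eq_aux c.toNat hn
  simpa using this

-- A's loop invariant: the fold over range(j, len cs) appends exactly the mapped zip of the drops
theorem pvLoop (cs : List Char) (hall : ∀ c ∈ cs, pvDomChar c = true) :
    ∀ (n j : ℕ) (acc : List Char), 1 ≤ j → cs.length - j ≤ n →
    (PySem.List.pyRange (j : ℤ) (cs.length : ℤ) 1).foldl
      (fun res i =>
        if pvVowelA (PySem.List.pyGetD cs i ' ') then res ++ [PySem.List.pyGetD cs (i - 1) ' ']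
        else res ++ [PySem.List.pyGetD cs i ' ']) acc
    = acc ++ ((cs.drop (j - 1)).zip (cs.drop j)).map (fun pc =>
        if pvVowelB pc.2 then pc.1 else pc.2) := by
  intro n
  induction n with
  | zero =>
    intro j acc hj hn
    have hle : cs.length ≤ j := by omega
    rw [PySem.List.pyRange_one_eq_nil (by exact_mod_cast hle)]
    simp [List.drop_eq_nil_of_le hle]
  | succ n ih =>
    intro j acc hj hn
    by_cases hlt : j < cs.length
    · rw [PySem.List.pyRange_one_cons (by exact_mod_cast hlt)]
      have hj1 : j - 1 < cs.length := by omega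
      have hget : PySem.List.pyGetD cs (j : ℤ) ' ' = cs[j] := by
        rw [PySem.List.pyGetD_eq_getElem cs ' ' (Int.natCast_nonneg j) (by exact_mod_cast hlt)]
        simp
      have hcast : (j : ℤ) - 1 = ((j - 1 : ℕ) : ℤ) := by omega
      have hget1 : PySem.List.pyGetD cs ((j : ℤ) - 1) ' ' = cs[j - 1] := by
        rw [hcast, PySem.List.pyGetD_eq_getElem cs ' ' (Int.natCast_nonneg _) (by exact_mod_cast hj1)]
        simp
      have hdrop1 : cs.drop (j - 1) = cs[j - 1] :: cs.drop j := by
        have := List.drop_eq_getElem_cons hj1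
        simpa [Nat.sub_add_cancel hj] using this
      have hdrop : cs.drop j = cs[j] :: cs.drop (j + 1) := List.drop_eq_getElem_cons hlt
      have hz : (cs.drop (j - 1)).zip (cs.drop j)
          = (cs[j - 1], cs[j]) :: ((cs.drop j).zip (cs.drop (j + 1))) := by
        rw [hdrop1]
        nth_rewrite 2 [hdrop]
        rw [List.zip_cons_cons]
      have hstep : ((j : ℤ) + 1) = ((j + 1 : ℕ) : ℤ) := by push_cast; ring
      rw [List.foldl_cons, hz]
      simp only [hget, hget1, List.map_cons]
      rw [hstep, ih (j + 1) _ (by omega) (by omega)]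
      have hvow := pvVowel_eq cs[j] (hall _ (List.getElem_mem hlt))
      simp only [hvow]
      split <;> simp
    · have hle : cs.length ≤ j := by omega
      rw [PySem.List.pyRange_one_eq_nil (by exact_mod_cast hle)]
      simp [List.drop_eq_nil_of_le hle]

-- pvFindRun: upper bound, and all scanned positions are vowels
theorem pvFindRun_le (cs : List Char) (j : Nat) (h : j ≤ cs.length) :
    pvFindRun cs j ≤ cs.length := by
  induction hcl : cs.length - j generalizing j with
  | zero =>
    rw [pvFindRun]
    split
    · rename_i hh; exact absurd hh (by omega)
    · omega
  | succ q ih =>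
    rw [pvFindRun]
    split
    · split
      · exact ih (j + 1) (by omega) (by omega)
      · omega
    · omega

theorem pvFindRun_vowel (cs : List Char) (j : Nat) :
    ∀ k (hk : k < cs.length), j ≤ k → k < pvFindRun cs j → pvVowelB cs[k] = true := by
  induction hcl : cs.length - j generalizing j with
  | zero =>
    intro k hk h1 h2
    rw [pvFindRun] at h2
    split at h2
    · rename_i hh; exact absurd hh (by omega)
    · omega
  | succ q ih =>
    intro k hk h1 h2
    rw [pvFindRun] at h2
    split at h2
    · split at h2
      · rename_i hlt hvj
        by_cases hkj : k = j
        · subst hkj; exact hvj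
        · exact ih (j + 1) (by omega) k hk (by omega) h2
      · omega
    · omega

-- a vowel run maps to its shifted slice: if the m positions from i are all vowels,
-- the elementwise map peels off take m of drop (i-1)
theorem pvRunPeel (cs : List Char) :
    ∀ (m i : ℕ), 1 ≤ i → i + m ≤ cs.length →
    (∀ k (hk : k < cs.length), i ≤ k → k < i + m → pvVowelB cs[k] = true) →
    ((cs.drop (i - 1)).zip (cs.drop i)).map (fun pc => if pvVowelB pc.2 then pc.1 else pc.2)
    = (cs.drop (i - 1)).take m ++
      ((cs.drop (i + m - 1)).zip (cs.drop (i + m))).map (fun pc => if pvVowelB pc.2 then pc.1 else pc.2) := by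
  intro m
  induction m with
  | zero => intro i hi hle hv; simp
  | succ m ih =>
    intro i hi hle hv
    have hlt : i < cs.length := by omega
    have hi1 : i - 1 < cs.length := by omega
    have hdrop1 : cs.drop (i - 1) = cs[i - 1] :: cs.drop i := by
      have := List.drop_eq_getElem_cons hi1
      simpa [Nat.sub_add_cancel hi] using this
    have hdrop : cs.drop i = cs[i] :: cs.drop (i + 1) := List.drop_eq_getElem_cons hlt
    have hz : (cs.drop (i - 1)).zip (cs.drop i)
        = (cs[i - 1], cs[i]) :: ((cs.drop i).zip (cs.drop (i + 1))) := by
      rw [hdrop1]; nth_rewrite 2 [hdrop]; rw [List.zip_cons_cons]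
    have hvi : pvVowelB cs[i] = true := hv i hlt le_rfl (by omega)
    have hrec := ih (i + 1) (by omega) (by omega)
      (fun k hk h1 h2 => hv k hk (by omega) (by omega))
    rw [show i + 1 - 1 = i by omega, show i + 1 + m - 1 = i + m by omega,
        show i + 1 + m = i + m + 1 by omega] at hrec
    rw [hz, List.map_cons, hvi, if_pos rfl, hrec,
        show i + (m + 1) - 1 = i + m by omega, show i + (m + 1) = i + m + 1 by omega]
    have htake : (cs.drop (i - 1)).take (m + 1) = cs[i - 1] :: (cs.drop i).take m := by
      rw [hdrop1, List.take_succ_cons]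
    rw [htake]
    simp

-- B's loop invariant, for i ≥ 1: it appends exactly the elementwise map of the zipped drops
theorem pvLoopBeq (cs : List Char) :
    ∀ (n i : ℕ) (partes : List (List Char)), 1 ≤ i → cs.length - i ≤ n →
    (pvLoopB cs i partes).flatten
    = partes.flatten ++ ((cs.drop (i - 1)).zip (cs.drop i)).map
        (fun pc => if pvVowelB pc.2 then pc.1 else pc.2) := by
  intro n
  induction n with
  | zero =>
    intro i partes hi hn
    have hle : cs.length ≤ i := by omega
    rw [pvLoopB, dif_neg (Nat.not_lt.mpr hle)]
    simp [List.drop_eq_nil_of_le hle]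
  | succ n ih =>
    intro i partes hi hn
    by_cases hlt : i < cs.length
    · rw [pvLoopB, dif_pos hlt]
      by_cases hv : pvVowelB cs[i] = true
      · rw [if_pos ⟨hi, hv⟩]
        set j := pvFindRun cs (i + 1) with hj
        have hji : i + 1 ≤ j := pvFindRun_ge cs (i + 1)
        have hjle : j ≤ cs.length := pvFindRun_le cs (i + 1) (by omega)
        have hvall : ∀ k (hk : k < cs.length), i ≤ k → k < j → pvVowelB cs[k] = true := by
          intro k hk h1 h2
          by_cases hki : k = i
          · subst hki; exact hv
          · exact pvFindRun_vowel cs (i + 1) k hk (by omega) h2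
        have hslice : PySem.List.slice cs (some ((i : ℤ) - 1)) (some ((j : ℤ) - 1))
            = (cs.drop (i - 1)).take (j - i) := by
          have h1 : ((i : ℤ) - 1) = ((i - 1 : ℕ) : ℤ) := by omega
          have h2 : ((j : ℤ) - 1) = ((j - 1 : ℕ) : ℤ) := by omega
          rw [h1, h2, PySem.List.slice_natCast]
          congr 1
          omega
        rw [ih j _ (by omega) (by omega)]
        rw [pvRunPeel cs (j - i) i hi (by omega)
          (fun k hk h1 h2 => hvall k hk h1 (by omega))]
        rw [show i + (j - i) = j by omega]
        simp [hslice]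
      · rw [if_neg (by simp [hv])]
        have hi1 : i - 1 < cs.length := by omega
        have hdrop1 : cs.drop (i - 1) = cs[i - 1] :: cs.drop i := by
          have := List.drop_eq_getElem_cons hi1
          simpa [Nat.sub_add_cancel hi] using this
        have hdrop : cs.drop i = cs[i] :: cs.drop (i + 1) := List.drop_eq_getElem_cons hlt
        have hz : (cs.drop (i - 1)).zip (cs.drop i)
            = (cs[i - 1], cs[i]) :: ((cs.drop i).zip (cs.drop (i + 1))) := by
          rw [hdrop1]; nth_rewrite 2 [hdrop]; rw [List.zip_cons_cons]
        rw [ih (i + 1) _ (by omega) (by omega), hz]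
        have : i + 1 - 1 = i := by omega
        rw [this]
        simp [hv]
    · rw [pvLoopB, dif_neg hlt]
      have hle : cs.length ≤ i := by omega
      simp [List.drop_eq_nil_of_le hle]

-- ===== VERDICT (by name: the statement is the Claim_ definition above) =====
theorem reemplazarvocal_spec : Claim_equal_reemplazarvocal := by
  intro texto hdom
  unfold Spec_reemplazarvocal reemplazarvocal reemplazarvocal_alt
  have hall : ∀ c ∈ texto.toList, pvDomChar c = true := by
    have h := hdom
    unfold Dom_reemplazarvocal pvDomStr at h
    simpa [List.all_eq_true] using h
  by_cases h0 : PySem.Str.len texto == 0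
  · have hlen : texto.toList.length = 0 := by
      have h1 : PySem.Str.len texto = 0 := by exact_mod_cast (by simpa using h0)
      simpa [PySem.Str.len] using h1
    have hnil : texto.toList = [] := List.eq_nil_of_length_eq_zero hlen
    have htx : texto = "" := by
      have := congrArg String.ofList hnil
      simpa using this
    subst htx
    simp [pvLoopB]
  · have hpos : 0 < texto.toList.length := by
      by_contra hc
      have hz : texto.toList.length = 0 := by omega
      simp [PySem.Str.len, hz] at h0
    have hlen : PySem.Str.len texto = (texto.toList.length : ℤ) := by
      simp [PySem.Str.len]
    have hA := pvLoop texto.toList hall texto.toList.length 1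
      [PySem.List.pyGetD texto.toList 0 ' '] le_rfl (by omega)
    simp only [Nat.cast_one] at hA
    have hget0 : PySem.List.pyGetD texto.toList 0 ' ' = texto.toList[0]'hpos := by
      rw [PySem.List.pyGetD_eq_getElem texto.toList ' ' le_rfl (by exact_mod_cast hpos)]
      simp
    have hne : (((texto.toList.length : ℤ)) == 0) = false := by
      simp only [beq_eq_false_iff_ne, ne_eq, Int.natCast_eq_zero]
      omega
    -- B side: first iteration (i = 0) copies texto[0], then the invariant from i = 1
    have hB0 : pvLoopB texto.toList 0 [] = pvLoopB texto.toList 1 [[texto.toList[0]'hpos]] := by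
      rw [pvLoopB, dif_pos hpos]
      simp
    have hB := pvLoopBeq texto.toList texto.toList.length 1 [[texto.toList[0]'hpos]] le_rfl (by omega)
    simp only [hlen, hne, Bool.false_eq_true, if_false]
    rw [hA, hget0, hB0, hB]
    simp [List.drop_one]
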